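-- pv_equiv track=rewrite | github.com/swtornio/logic | logic.py | get_base_letters
-- ===== SOURCE A (Python) =====
-- def get_base_letters(email):
--     # Initialize the base letters
--     base_letters = ""
--     # For each character in the email
--     for char in email:
--         # If the character is a letter
--         if char.isalpha():
--             # Add it to the base letters
--             base_letters += char
--         # If the character is a number
--         elif char.isdigit():
--             # Stop looking for base letters
--             break
--     # Return the base letters
--     return base_letters
-- ===== SOURCE B (Python) =====
-- def get_base_letters(email):
--     # Two passes: locate the cut at the first digit (defaulting to the full length), then
--     # keep only the letters of the prefix before it.
--     cut = next((i for i, c in enumerate(email) if c.isdigit()), len(email))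
--     return ''.join(c for c in email[:cut] if c.isalpha())
-- ===== Notes on version B (the rewrite author's own statement) =====
-- stated objective: idiomatic
-- what changed: A's single accumulate-with-break loop becomes two distinct passes: first find the index of the first digit (next over enumerate), then keep only the letters of the slice before that index via a str.join over a filtering generator.
import Mathlib
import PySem

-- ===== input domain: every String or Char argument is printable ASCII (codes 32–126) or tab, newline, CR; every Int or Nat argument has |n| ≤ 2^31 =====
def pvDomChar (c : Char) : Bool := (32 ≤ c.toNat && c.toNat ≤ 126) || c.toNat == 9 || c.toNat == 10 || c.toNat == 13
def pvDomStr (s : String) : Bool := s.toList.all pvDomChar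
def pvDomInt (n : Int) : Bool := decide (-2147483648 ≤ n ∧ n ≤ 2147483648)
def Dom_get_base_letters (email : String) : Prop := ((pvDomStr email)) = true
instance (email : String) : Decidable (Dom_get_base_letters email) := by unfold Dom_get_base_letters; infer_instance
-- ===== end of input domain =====

-- B changes A's single accumulate-with-break loop into two passes (find the cut at the
-- first digit, then filter letters from the prefix); objective: a more idiomatic decomposition.

-- ===== PORT A =====
-- the for-loop with accumulator and break: recursion over the characters,
-- returning the accumulator at the first digit
def getBaseLoopA (acc : List Char) : List Char → List Char
  | [] => acc
  | c :: cs =>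
    if PySem.Chars.isalpha c then getBaseLoopA (acc ++ [c]) cs
    else if PySem.Chars.isdigit c then acc
    else getBaseLoopA acc cs

def get_base_letters (email : String) : String :=
  String.ofList (getBaseLoopA [] email.toList)

-- ===== PORT B =====
-- cut = index of the first digit, or len(email) if there is none
-- (next(... enumerate ...) = findIdx?, with the default len);
-- email[:cut] with 0 <= cut <= len is List.take cut; the join-over-filter is List.filter
def get_base_letters_alt (email : String) : String :=
  let cut := ((email.toList.findIdx? (fun c => PySem.Chars.isdigit c)).getD email.toList.length)
  String.ofList ((email.toList.take cut).filter (fun c => PySem.Chars.isalpha c))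

-- ===== PRECONDITION & SPEC =====
def Spec_get_base_letters (email : String) (out : String) : Prop := out = get_base_letters_alt email
instance (email : String) (out : String) : Decidable (Spec_get_base_letters email out) := by unfold Spec_get_base_letters; infer_instance

-- ===== CLAIM (what is proved, stated in full; the proofs are below) =====
def Claim_equal_get_base_letters : Prop := ∀ (email : String), Dom_get_base_letters email → Spec_get_base_letters email (get_base_letters email)

-- ===== LEMMAS AND PROOFS =====

-- a digit is never a letter
lemma isdigit_not_isalpha (c : Char) (h : PySem.Chars.isdigit c = true) :
    PySem.Chars.isalpha c = false := by
  simp [PySem.Chars.isdigit, PySem.Chars.isalpha, PySem.Chars.isupper, PySem.Chars.islower,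
    Char.le_def, UInt32.le_iff_toNat_le] at *
  omega

lemma getBaseLoopA_eq (cs : List Char) : ∀ acc : List Char,
    getBaseLoopA acc cs =
      acc ++ (cs.take ((cs.findIdx? (fun c => PySem.Chars.isdigit c)).getD cs.length)).filter
        (fun c => PySem.Chars.isalpha c) := by
  induction cs with
  | nil => intro acc; simp [getBaseLoopA]
  | cons c cs ih =>
    intro acc
    by_cases hd : PySem.Chars.isdigit c = true
    · simp [getBaseLoopA, List.findIdx?_cons, hd, isdigit_not_isalpha c hd]
    · have htake : List.take (((c :: cs).findIdx? (fun x => PySem.Chars.isdigit x)).getD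
            (cs.length + 1)) (c :: cs)
          = c :: List.take ((cs.findIdx? (fun x => PySem.Chars.isdigit x)).getD cs.length) cs := by
        simp only [List.findIdx?_cons]
        cases h : cs.findIdx? (fun x => PySem.Chars.isdigit x) <;>
          simp [hd, List.take_succ_cons]
      by_cases ha : PySem.Chars.isalpha c = true
      · simp [getBaseLoopA, ha, ih]
        rw [htake]
        simp [ha]
      · simp [getBaseLoopA, ha, hd, ih]
        rw [htake]
        simp [ha]

-- ===== VERDICT (by name: the statement is the Claim_ definition above) =====
theorem get_base_letters_spec : Claim_equal_get_base_letters := by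
  intro email _
  unfold Spec_get_base_letters get_base_letters get_base_letters_alt
  rw [getBaseLoopA_eq]
  simp
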